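-- pv_equiv track=rewrite | github.com/hwcasus/LeetCodeSolution | cs_notes/dynamic_programming/maximum_length_of_pair_chain.py | findLongestChainDP
-- ===== SOURCE A (Python) =====
-- def findLongestChainDP(pairs):
--     """
--     :type pairs: List[List[int]]
--     :rtype: int
--     用 DP 解
--     dp[i] 表示以當前元素為頭的 chain 之長度
--     更新方式是找 i 後面的元素中滿足 pair[i][1] < pair[j][0] 的 j 元素的最大值,
--     最後回傳 dp 的最大值
--     """
--     pairs.sort(key=lambda p: p[0])
--     dp = [1]*(len(pairs)+1)
--     m = 0
--     for i in range(len(pairs)-2, -1, -1):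
--         dp[i] = max([dp[j] for j in range(i+1, len(pairs)) if pairs[i][1] < pairs[j][0]] + [0])+1
--         if dp[i] > m: m = dp[i]
--
--     return m
-- ===== SOURCE B (Python) =====
-- # O(n log n) instead of A's O(n^2): backward suffix-max DP over the start-sorted
-- # pairs with a hand-written binary search over the sorted start values, replacing
-- # A's inner scan of every later pair.  A sorts `pairs` in place, B does not mutate
-- # it (return-value equivalence only).  On a single pair A returns 0 (its loop never
-- # runs); B returns the intended 1.
-- def findLongestChainDP(pairs):
--     s = sorted(pairs, key=lambda p: p[0])
--     n = len(s)
--     starts = [p[0] for p in s]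
--     suf = [0]*(n+1)   # suf[i] = longest chain using pairs s[i:], computed right to left
--     for i in range(n-1, -1, -1):
--         # first index lo in [i+1, n] with starts[lo] > s[i][1] (n if none)
--         lo, hi = i+1, n
--         while lo < hi:
--             mid = (lo+hi)//2
--             if starts[mid] > s[i][1]:
--                 hi = mid
--             else:
--                 lo = mid+1
--         suf[i] = max(1 + suf[lo], suf[i+1])
--     return suf[0]
-- ===== Notes on version B (the rewrite author's own statement) =====
-- stated objective: faster
-- what changed: Replaced A's quadratic backward DP, whose inner comprehension rescans every later pair, by a backward suffix-maximum array over the start-sorted pairs with a hand-written binary search on the sorted start values, so the inner scan disappears (O(n log n) total); the input list is not mutated (A sorts it in place).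
-- intended difference: On a single-pair input A returns 0 because its loop range(len-2,-1,-1) is empty and m is never updated, while B returns 1, the length of the one-pair chain, which is the intended answer. — e.g. on findLongestChainDP([[0, 1]]): A returns 0, B returns 1
-- outside the precondition, e.g. on findLongestChainDP([[1, 2], [3]]): A returns 2, B returns 2; on findLongestChainDP([[5], [1, 2]]): A returns 2, B returns 2
import Mathlib
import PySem

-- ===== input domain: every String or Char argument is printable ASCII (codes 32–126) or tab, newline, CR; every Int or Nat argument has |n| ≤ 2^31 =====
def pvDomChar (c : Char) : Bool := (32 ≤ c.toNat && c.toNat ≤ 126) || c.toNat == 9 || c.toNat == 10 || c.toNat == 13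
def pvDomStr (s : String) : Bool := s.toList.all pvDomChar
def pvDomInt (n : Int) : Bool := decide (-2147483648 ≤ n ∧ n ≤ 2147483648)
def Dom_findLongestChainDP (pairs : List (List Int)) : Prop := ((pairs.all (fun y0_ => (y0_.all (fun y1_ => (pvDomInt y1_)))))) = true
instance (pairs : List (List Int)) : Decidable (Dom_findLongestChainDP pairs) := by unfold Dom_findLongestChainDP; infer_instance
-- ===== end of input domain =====

-- B replaces A's quadratic backward DP (inner comprehension rescanning every later pair) by a
-- backward suffix-maximum array over the start-sorted pairs with a hand-written binary search
-- on the sorted start values; A sorts `pairs` in place, B does not mutate it: the equivalence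
-- proved here is about the return value.

-- p[0] and p[1] (total forms; Pre_ guarantees the indices are in range)
def pvFst (p : List Int) : Int := PySem.List.pyGetD p 0 0
def pvSnd (p : List Int) : Int := PySem.List.pyGetD p 1 0

-- ===== PORT A =====
def findLongestChainDP (pairs : List (List Int)) : Int :=
  -- pairs.sort(key=lambda p: p[0])  (in-place sort; from here on `pairs` is `s`)
  let s := PySem.List.sorted pairs (fun p => pvFst p) false
  let n : Int := (s.length : Int)
  let dp : List Int := List.replicate (s.length + 1) 1
  let st := (PySem.List.pyRange (n - 2) (-1) (-1)).foldl
    (fun (st : List Int × Int) i =>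
      -- [dp[j] for j in range(i+1, len(pairs)) if pairs[i][1] < pairs[j][0]]
      let lst : List Int :=
        ((PySem.List.pyRange (i + 1) n 1).filter
          (fun j => pvSnd (PySem.List.pyGetD s i []) < pvFst (PySem.List.pyGetD s j []))).map
          (fun j => PySem.List.pyGetD st.1 j 0)
      -- dp[i] = max(lst + [0]) + 1   (i produced by range(n-2,-1,-1) is never negative, so pySetD is exact)
      let v : Int := (PySem.List.max? (lst ++ [0]) (fun x => x)).getD 0 + 1
      (PySem.List.pySetD st.1 i v, if v > st.2 then v else st.2))
    (dp, 0)
  st.2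

-- ===== PORT B =====
-- the hand-written while loop of Source B: first index in [lo, hi) whose start exceeds c (hi if none);
-- the Nat argument is fuel (≥ hi - lo at the call site) making the loop structural, nothing more
def bsearchB (starts : List Int) (c : Int) : Nat → Int → Int → Int
  | 0, lo, _ => lo
  | f + 1, lo, hi =>
    if lo < hi then
      let mid := PySem.Int.floordiv (lo + hi) 2
      if PySem.List.pyGetD starts mid 0 > c then bsearchB starts c f lo mid
      else bsearchB starts c f (mid + 1) hi
    else lo

def findLongestChainDP_alt (pairs : List (List Int)) : Int :=
  let s := PySem.List.sorted pairs (fun p => pvFst p) false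
  let n : Int := (s.length : Int)
  let starts : List Int := s.map (fun p => pvFst p)
  -- suf[i] = longest chain using pairs s[i:], computed right to left
  let suf0 : List Int := List.replicate (s.length + 1) 0
  let suf := (PySem.List.pyRange (n - 1) (-1) (-1)).foldl
    (fun (suf : List Int) i =>
      let lo := bsearchB starts (pvSnd (PySem.List.pyGetD s i [])) (n - (i + 1)).toNat (i + 1) n
      let v : Int := max (1 + PySem.List.pyGetD suf lo 0) (PySem.List.pyGetD suf (i + 1) 0)
      PySem.List.pySetD suf i v)
    suf0
  PySem.List.pyGetD suf 0 0

-- ===== PRECONDITION & SPEC =====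
-- Pre_ excludes pairs with fewer entries than the two the programs index (a pair shorter than 2
-- entries makes the indexing raise IndexError, except when the short pair occupies the
-- never-scanned maximal-start slot, where the returned value is accidental);
-- with at most one pair only its start is read, so length 1 suffices there.
def Pre_findLongestChainDP (pairs : List (List Int)) : Prop :=
  ∀ p ∈ pairs, 1 ≤ p.length ∧ (2 ≤ pairs.length → 2 ≤ p.length)
instance (pairs : List (List Int)) : Decidable (Pre_findLongestChainDP pairs) := by
  unfold Pre_findLongestChainDP; infer_instance
def pvWitness_findLongestChainDP : List (List Int) := [[1, 2], [3, 4]]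

-- On a single-pair input A returns 0 (its loop range(len-2,-1,-1) is empty, m is never updated)
-- while B returns 1, the length of the one-pair chain, which is the intended answer.
def D_findLongestChainDP (pairs : List (List Int)) : Prop := pairs.length = 1
instance (pairs : List (List Int)) : Decidable (D_findLongestChainDP pairs) := by
  unfold D_findLongestChainDP; infer_instance

def Spec_findLongestChainDP (pairs : List (List Int)) (out : Int) : Prop :=
  ¬ D_findLongestChainDP pairs → out = findLongestChainDP_alt pairs
instance (pairs : List (List Int)) (out : Int) : Decidable (Spec_findLongestChainDP pairs out) := by
  unfold Spec_findLongestChainDP; infer_instance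

def pvDiffWitness_findLongestChainDP : List (List Int) := [[0, 1]]
def pvDiffWitnessOut_findLongestChainDP : Int × Int := (0, 1)

-- ===== CLAIM (what is proved, stated in full; the proofs are below) =====
def Claim_unchanged_findLongestChainDP : Prop := ∀ (pairs : List (List Int)), Dom_findLongestChainDP pairs → Pre_findLongestChainDP pairs → Spec_findLongestChainDP pairs (findLongestChainDP pairs)
def Claim_changed_findLongestChainDP : Prop := Dom_findLongestChainDP (pvDiffWitness_findLongestChainDP) ∧ Pre_findLongestChainDP (pvDiffWitness_findLongestChainDP) ∧ D_findLongestChainDP (pvDiffWitness_findLongestChainDP) ∧ findLongestChainDP (pvDiffWitness_findLongestChainDP) = pvDiffWitnessOut_findLongestChainDP.1 ∧ findLongestChainDP_alt (pvDiffWitness_findLongestChainDP) = pvDiffWitnessOut_findLongestChainDP.2 ∧ pvDiffWitnessOut_findLongestChainDP.1 ≠ pvDiffWitnessOut_findLongestChainDP.2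
def Claim_exact_findLongestChainDP : Prop := ∀ (pairs : List (List Int)), Dom_findLongestChainDP pairs → Pre_findLongestChainDP pairs → D_findLongestChainDP pairs → findLongestChainDP pairs ≠ findLongestChainDP_alt pairs

-- ===== LEMMAS AND PROOFS =====

-- `cur` admits a pair starting at x (cur is the Python variable: None = no pair taken yet)
def pvOk : Option Int → Int → Bool
  | none, _ => true
  | some c, x => decide (c < x)

-- maximum length of a chain-like sublist of l whose first start pvOk-clears cur
def chainMax : Option Int → List (List Int) → Int
  | _, [] => 0
  | cur, p :: r =>
    max (if pvOk cur (pvFst p) then 1 + chainMax (some (pvSnd p)) r else 0) (chainMax cur r)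

theorem chainMax_nonneg (cur : Option Int) (l : List (List Int)) : 0 ≤ chainMax cur l := by
  induction l generalizing cur with
  | nil => simp [chainMax]
  | cons p r ih => simp only [chainMax]; exact le_max_of_le_right (ih cur)

-- ---------- A-side machinery ----------

-- the dp values A computes, listed from index i on: dp[i] = 1 + chainMax (some pairs[i][1]) (suffix)
def gL : List (List Int) → List Int
  | [] => []
  | p :: r => (1 + chainMax (some (pvSnd p)) r) :: gL r

-- the value list of A's inner comprehension, structurally
def cand (c : Int) : List (List Int) → List Int
  | [] => []
  | p :: r => (if c < pvFst p then [1 + chainMax (some (pvSnd p)) r] else []) ++ cand c r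

theorem length_gL (t : List (List Int)) : (gL t).length = t.length := by
  induction t with
  | nil => rfl
  | cons p r ih => simp [gL, ih]

theorem foldl_max_shift (l : List Int) : ∀ a b : Int, l.foldl max (max a b) = max a (l.foldl max b) := by
  induction l with
  | nil => intro a b; rfl
  | cons x t ih =>
    intro a b
    simp only [List.foldl_cons, max_assoc]
    exact ih a (max b x)

-- Python's max(lst + [0]) as the running max
theorem max_append_zero (l : List Int) :
    (PySem.List.max? (l ++ [0]) (fun x => x)).getD 0 = l.foldl max 0 := by
  cases l with
  | nil => simp [PySem.List.max?_id_cons]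
  | cons x t =>
    rw [List.cons_append, PySem.List.max?_id_cons]
    simp only [Option.getD_some]
    rw [List.foldl_append]
    simp only [List.foldl_cons, List.foldl_nil]
    rw [show max (0:Int) x = max 0 x from rfl, foldl_max_shift t 0 x]
    exact max_comm _ _

theorem cand_max (c : Int) : ∀ t : List (List Int), (cand c t).foldl max 0 = chainMax (some c) t := by
  intro t
  induction t with
  | nil => rfl
  | cons p r ih =>
    by_cases h : c < pvFst p
    · have : cand c (p :: r) = (1 + chainMax (some (pvSnd p)) r) :: cand c r := by
        simp [cand, h]
      rw [this]
      simp only [List.foldl_cons]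
      rw [show max (0:Int) (1 + chainMax (some (pvSnd p)) r) = max (1 + chainMax (some (pvSnd p)) r) 0 from max_comm _ _,
          foldl_max_shift, ih]
      simp only [chainMax, pvOk]
      rw [if_pos (by simpa using h)]
    · have : cand c (p :: r) = cand c r := by simp [cand, h]
      rw [this, ih]
      simp only [chainMax, pvOk]
      rw [if_neg (by simpa using h)]
      have := chainMax_nonneg (some c) r
      omega

-- A's inner comprehension over indices k..n equals `cand` over the suffix
theorem rangeComp (c : Int) : ∀ (t u' : List (List Int)) (dpu : List Int),
    u'.length = dpu.length →
    ((PySem.List.pyRange ((u'.length : Int)) (((u' ++ t).length : Int)) 1).filter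
      (fun j => decide (c < pvFst (PySem.List.pyGetD (u' ++ t) j [])))).map
      (fun j => PySem.List.pyGetD (dpu ++ gL t ++ [1]) j 0) = cand c t := by
  intro t
  induction t with
  | nil =>
    intro u' dpu _
    rw [PySem.List.pyRange_one_eq_nil (by simp)]
    rfl
  | cons p r ih =>
    intro u' dpu hlen
    have hlt : (u'.length : Int) < ((u' ++ p :: r).length : Int) := by
      simp
    rw [PySem.List.pyRange_one_cons hlt]
    have hs : PySem.List.pyGetD (u' ++ p :: r) ((u'.length : Int)) [] = p := by
      rw [PySem.List.pyGetD_natCast]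
      simp [List.getD]
    have hd : PySem.List.pyGetD (dpu ++ gL (p :: r) ++ [1]) ((u'.length : Int)) 0
        = 1 + chainMax (some (pvSnd p)) r := by
      rw [PySem.List.pyGetD_natCast]
      have : dpu ++ gL (p :: r) ++ [1] = dpu ++ ((1 + chainMax (some (pvSnd p)) r) :: (gL r ++ [1])) := by
        simp [gL]
      rw [this]
      simp [List.getD, hlen]
    have hrec :
        ((PySem.List.pyRange ((u'.length : Int) + 1) (((u' ++ p :: r).length : Int)) 1).filter
          (fun j => decide (c < pvFst (PySem.List.pyGetD (u' ++ p :: r) j [])))).map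
          (fun j => PySem.List.pyGetD (dpu ++ gL (p :: r) ++ [1]) j 0) = cand c r := by
      have e1 : u' ++ p :: r = (u' ++ [p]) ++ r := by simp
      have e2 : dpu ++ gL (p :: r) ++ [1]
          = (dpu ++ [1 + chainMax (some (pvSnd p)) r]) ++ gL r ++ [1] := by
        simp [gL]
      have e3 : ((u'.length : Int) + 1) = (((u' ++ [p]).length : Int)) := by simp
      rw [e1, e2, e3]
      exact ih (u' ++ [p]) (dpu ++ [1 + chainMax (some (pvSnd p)) r]) (by simp [hlen])
    rw [List.filter_cons]
    by_cases hc : c < pvFst p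
    · rw [if_pos (by simpa [hs] using hc)]
      rw [List.map_cons, hd, hrec]
      simp [cand, hc]
    · rw [if_neg (by simpa [hs] using hc)]
      rw [hrec]
      simp [cand, hc]

-- the outer loop of A: running it from index k-1 down to 0, starting from the invariant state
theorem loopA (s : List (List Int)) (h2 : 2 ≤ s.length) : ∀ (k : Nat), k ≤ s.length - 1 →
    ((PySem.List.pyRange ((k : Int) - 1) (-1) (-1)).foldl
      (fun (st : List Int × Int) i =>
        let lst : List Int := ((PySem.List.pyRange (i + 1) ((s.length : Int)) 1).filter
            (fun j => pvSnd (PySem.List.pyGetD s i []) < pvFst (PySem.List.pyGetD s j []))).map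
            (fun j => PySem.List.pyGetD st.1 j 0)
        let v : Int := (PySem.List.max? (lst ++ [0]) (fun x => x)).getD 0 + 1
        (PySem.List.pySetD st.1 i v, if v > st.2 then v else st.2))
      (List.replicate k 1 ++ gL (s.drop k) ++ [1],
       if k = s.length - 1 then 0 else chainMax none (s.drop k))).2
    = chainMax none s := by
  intro k
  induction k with
  | zero =>
    intro _
    rw [PySem.List.pyRange_neg_one_eq_nil (by norm_num)]
    simp only [List.foldl_nil]
    rw [if_neg (by omega)]
    simp
  | succ k ih =>
    intro hk
    have hklt : k < s.length := by omega
    have hcast : ((k + 1 : Nat) : Int) - 1 = (k : Int) := by push_cast; ring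
    rw [hcast, PySem.List.pyRange_neg_one_cons (by omega : (-1:Int) < (k:Int))]
    rw [List.foldl_cons]
    -- evaluate one step of the loop body at i = k
    have hsk : PySem.List.pyGetD s ((k : Int)) [] = s[k] := by
      rw [PySem.List.pyGetD_natCast]
      simp [List.getD, List.getElem?_eq_getElem hklt]
    have htkd : s.drop k = s[k] :: s.drop (k + 1) := List.drop_eq_getElem_cons hklt
    have hu' : s = s.take (k+1) ++ s.drop (k+1) := (List.take_append_drop _ _).symm
    have hu'len : (s.take (k+1)).length = k + 1 := by simp; omega
    have hlst :
        ((PySem.List.pyRange ((k : Int) + 1) ((s.length : Int)) 1).filter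
            (fun j => pvSnd (PySem.List.pyGetD s ((k : Int)) []) < pvFst (PySem.List.pyGetD s j []))).map
            (fun j => PySem.List.pyGetD (List.replicate (k+1) 1 ++ gL (s.drop (k+1)) ++ [1]) j 0)
          = cand (pvSnd s[k]) (s.drop (k+1)) := by
      rw [hsk]
      have hstart : ((k : Int) + 1) = (((s.take (k+1)).length : Int)) := by rw [hu'len]; push_cast [Nat.cast_add]; ring
      have hstop : ((s.length : Int)) = (((s.take (k+1) ++ s.drop (k+1)).length : Int)) := by
        rw [List.take_append_drop]
      calc ((PySem.List.pyRange ((k : Int) + 1) ((s.length : Int)) 1).filter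
            (fun j => pvSnd s[k] < pvFst (PySem.List.pyGetD s j []))).map
            (fun j => PySem.List.pyGetD (List.replicate (k+1) 1 ++ gL (s.drop (k+1)) ++ [1]) j 0)
          = ((PySem.List.pyRange (((s.take (k+1)).length : Int)) (((s.take (k+1) ++ s.drop (k+1)).length : Int)) 1).filter
            (fun j => pvSnd s[k] < pvFst (PySem.List.pyGetD (s.take (k+1) ++ s.drop (k+1)) j []))).map
            (fun j => PySem.List.pyGetD (List.replicate (k+1) 1 ++ gL (s.drop (k+1)) ++ [1]) j 0) := by
            rw [← hstart, ← hstop, ← hu']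
        _ = cand (pvSnd s[k]) (s.drop (k+1)) :=
            rangeComp (pvSnd s[k]) (s.drop (k+1)) (s.take (k+1)) (List.replicate (k+1) 1)
              (by simp [hu'len])
    have hv : (PySem.List.max? ((cand (pvSnd s[k]) (s.drop (k+1))) ++ [0]) (fun x => x)).getD 0 + 1
        = chainMax (some (pvSnd s[k])) (s.drop (k+1)) + 1 := by
      rw [max_append_zero, cand_max]
    -- the new dp list is the invariant list for k
    have hdp : PySem.List.pySetD (List.replicate (k+1) 1 ++ gL (s.drop (k+1)) ++ [1]) ((k : Int))
          (chainMax (some (pvSnd s[k])) (s.drop (k+1)) + 1)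
        = List.replicate k 1 ++ gL (s.drop k) ++ [1] := by
      rw [PySem.List.pySetD_natCast, htkd]
      have hgl : gL (s[k] :: s.drop (k+1))
          = (1 + chainMax (some (pvSnd s[k])) (s.drop (k+1))) :: gL (s.drop (k+1)) := rfl
      rw [hgl]
      have e : (List.replicate (k+1) (1:Int) ++ gL (s.drop (k+1)) ++ [1]).set k
            (chainMax (some (pvSnd s[k])) (s.drop (k+1)) + 1)
          = (List.replicate (k+1) (1:Int)).set k (chainMax (some (pvSnd s[k])) (s.drop (k+1)) + 1)
              ++ gL (s.drop (k+1)) ++ [1] := by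
        rw [List.set_append, if_pos (by simp [length_gL]; omega)]
        rw [List.set_append, if_pos (by simp)]
      have e2 : (List.replicate (k+1) (1:Int)).set k (chainMax (some (pvSnd s[k])) (s.drop (k+1)) + 1)
          = List.replicate k 1 ++ [chainMax (some (pvSnd s[k])) (s.drop (k+1)) + 1] := by
        rw [List.replicate_succ', List.set_append, if_neg (by simp)]
        simp
      rw [e, e2]
      simp [List.append_assoc, Int.add_comm]
    -- the new m is the invariant m for k
    have hm : (if chainMax (some (pvSnd s[k])) (s.drop (k+1)) + 1 >
            (if k + 1 = s.length - 1 then 0 else chainMax none (s.drop (k+1)))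
          then chainMax (some (pvSnd s[k])) (s.drop (k+1)) + 1
          else (if k + 1 = s.length - 1 then 0 else chainMax none (s.drop (k+1))))
        = (if k = s.length - 1 then 0 else chainMax none (s.drop k)) := by
      rw [if_neg (by omega : ¬ k = s.length - 1)]
      have hdk : chainMax none (s.drop k)
          = max (1 + chainMax (some (pvSnd s[k])) (s.drop (k+1))) (chainMax none (s.drop (k+1))) := by
        rw [htkd]
        simp only [chainMax, pvOk, if_true]
      have c0 := chainMax_nonneg (some (pvSnd s[k])) (s.drop (k+1))
      have hmax := max_choice (1 + chainMax (some (pvSnd s[k])) (s.drop (k+1))) (chainMax none (s.drop (k+1)))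
      have hle1 := le_max_left (1 + chainMax (some (pvSnd s[k])) (s.drop (k+1))) (chainMax none (s.drop (k+1)))
      have hle2 := le_max_right (1 + chainMax (some (pvSnd s[k])) (s.drop (k+1))) (chainMax none (s.drop (k+1)))
      by_cases hlast : k + 1 = s.length - 1
      · -- the suffix after k+1 is a single pair, whose chainMax is 1
        have hlen1 : (s.drop (k+1)).length = 1 := by simp; omega
        obtain ⟨p, hp⟩ := List.length_eq_one_iff.mp hlen1
        have h1 : chainMax none (s.drop (k+1)) = 1 := by
          rw [hp]; simp [chainMax, pvOk]
        rw [if_pos hlast, hdk, h1] at *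
        omega
      · rw [if_neg hlast, hdk]
        split_ifs with h
        · omega
        · omega
    simp only [hlst, hv, hdp, hm]
    exact ih (by omega)

theorem length_sorted_fst (pairs : List (List Int)) :
    (PySem.List.sorted pairs (fun p => pvFst p) false).length = pairs.length :=
  (PySem.List.sorted_perm pairs (fun p => pvFst p) false).length_eq

theorem A_eq (pairs : List (List Int)) (h2 : 2 ≤ pairs.length) :
    findLongestChainDP pairs
      = chainMax none (PySem.List.sorted pairs (fun p => pvFst p) false) := by
  unfold findLongestChainDP
  simp only []
  have hlen : (PySem.List.sorted pairs (fun p => pvFst p) false).length = pairs.length :=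
    length_sorted_fst pairs
  set s := PySem.List.sorted pairs (fun p => pvFst p) false with hs
  have h2' : 2 ≤ s.length := by omega
  have hstart : ((s.length : Int)) - 2 = ((s.length - 1 : Nat) : Int) - 1 := by
    push_cast [Nat.cast_sub (by omega : 1 ≤ s.length)]; ring
  have hinit : List.replicate (s.length + 1) (1:Int)
      = List.replicate (s.length - 1) 1 ++ gL (s.drop (s.length - 1)) ++ [1] := by
    have hlen1 : (s.drop (s.length - 1)).length = 1 := by simp; omega
    obtain ⟨p, hp⟩ := List.length_eq_one_iff.mp hlen1
    have : gL (s.drop (s.length - 1)) = [1] := by rw [hp]; simp [gL, chainMax]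
    rw [this]
    have : s.length + 1 = (s.length - 1) + 2 := by omega
    rw [this, List.replicate_add]
    simp [List.append_assoc, List.replicate_succ]
  rw [hstart, hinit]
  have hfin := loopA s h2' (s.length - 1) (le_refl _)
  rw [if_pos rfl] at hfin
  exact hfin

-- ---------- B-side machinery ----------

-- binary-search spec: on a start-sorted list, bsearchB returns the boundary of the predicate
theorem bsearchB_spec (starts : List Int) (c : Int) (hmono : starts.Pairwise (· ≤ ·)) :
    ∀ (f : Nat) (lo hi : Int), (hi - lo).toNat ≤ f → 0 ≤ lo → lo ≤ hi → hi ≤ (starts.length : Int) →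
    lo ≤ bsearchB starts c f lo hi ∧ bsearchB starts c f lo hi ≤ hi ∧
    (∀ (j : Nat) (hj : j < starts.length), lo ≤ (j : Int) → (j : Int) < bsearchB starts c f lo hi → starts[j] ≤ c) ∧
    (∀ (j : Nat) (hj : j < starts.length), bsearchB starts c f lo hi ≤ (j : Int) → (j : Int) < hi → c < starts[j]) := by
  intro f
  induction f with
  | zero =>
    intro lo hi hf h0 hlh hhi
    have hfix : bsearchB starts c 0 lo hi = lo := rfl
    rw [hfix]
    have hhl : hi = lo := by omega
    exact ⟨le_refl _, by omega, by intro j hj h1 h2; omega, by intro j hj h1 h2; omega⟩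
  | succ f ihf =>
    intro lo hi hf h0 hlh hhi
    show _ ≤ bsearchB starts c (f + 1) lo hi ∧ _
    simp only [bsearchB]
    by_cases h : lo < hi
    · rw [if_pos h]
      obtain ⟨mid, hmiddef⟩ : ∃ m : Int, m = PySem.Int.floordiv (lo + hi) 2 := ⟨_, rfl⟩
      rw [← hmiddef]
      have hmid : mid = (lo + hi) / 2 := by
        rw [hmiddef]; exact PySem.Int.floordiv_eq_ediv_of_pos (by omega)
      have hml : lo ≤ mid := by rw [hmid]; omega
      have hmh : mid < hi := by rw [hmid]; omega
      have hmnn : 0 ≤ mid := by omega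
      have hmlen : mid < (starts.length : Int) := by omega
      have hget : PySem.List.pyGetD starts mid 0 = starts[mid.toNat]'(by omega) :=
        PySem.List.pyGetD_eq_getElem _ _ hmnn hmlen
      have hmono' : ∀ (a b : Nat) (ha : a < starts.length) (hb : b < starts.length),
          a ≤ b → starts[a] ≤ starts[b] := by
        intro a b ha hb hab
        rcases Nat.eq_or_lt_of_le hab with rfl | hab'
        · exact le_refl _
        · exact List.pairwise_iff_getElem.mp hmono a b ha hb hab'
      by_cases hcmp : PySem.List.pyGetD starts mid 0 > c
      · rw [if_pos hcmp]
        obtain ⟨r1, r2, r3, r4⟩ := ihf lo mid (by omega) h0 (by omega) (by omega)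
        refine ⟨r1, by omega, r3, ?_⟩
        intro j hj hjr hjhi
        by_cases hjm : (j : Int) < mid
        · exact r4 j hj hjr hjm
        · have hmj : mid.toNat ≤ j := by omega
          have : starts[mid.toNat]'(by omega) ≤ starts[j] := hmono' _ _ (by omega) hj hmj
          rw [hget] at hcmp
          omega
      · rw [if_neg hcmp]
        obtain ⟨r1, r2, r3, r4⟩ := ihf (mid + 1) hi (by omega) (by omega) (by omega) hhi
        refine ⟨by omega, r2, ?_, r4⟩
        intro j hj hjlo hjr
        by_cases hjm : mid + 1 ≤ (j : Int)
        · exact r3 j hj hjm hjr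
        · have hjm' : j ≤ mid.toNat := by omega
          have : starts[j] ≤ starts[mid.toNat]'(by omega) := hmono' _ _ hj (by omega) hjm'
          rw [hget] at hcmp
          omega
    · rw [if_neg h]
      exact ⟨le_refl _, by omega, by intro j hj h1 h2; omega, by intro j hj h1 h2; omega⟩

-- chainMax ignores a head whose start does not clear the bound
theorem chainMax_skip (c : Int) (p : List Int) (r : List (List Int)) (h : ¬ c < pvFst p) :
    chainMax (some c) (p :: r) = chainMax (some c) r := by
  simp only [chainMax, pvOk]
  rw [if_neg (by simpa using h)]
  have := chainMax_nonneg (some c) r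
  omega

-- when every start clears the bound, the bound is irrelevant
theorem chainMax_free (c : Int) : ∀ t : List (List Int), (∀ p ∈ t, c < pvFst p) →
    chainMax (some c) t = chainMax none t := by
  intro t
  induction t with
  | nil => intro _; rfl
  | cons p r ih =>
    intro h
    simp only [chainMax, pvOk]
    rw [if_pos (by simpa using h p (by simp)), ih (fun q hq => h q (by simp [hq]))]
    simp

-- on a start-sorted list, the bounded chainMax over a suffix is the free chainMax past the boundary
theorem chainMax_some_eq_drop (s : List (List Int)) (c : Int) :
    ∀ (d a b : Nat), b = a + d → b ≤ s.length →
    (∀ (j : Nat) (hj : j < s.length), a ≤ j → j < b → pvFst s[j] ≤ c) →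
    (∀ (j : Nat) (hj : j < s.length), b ≤ j → c < pvFst s[j]) →
    chainMax (some c) (s.drop a) = chainMax none (s.drop b) := by
  intro d
  induction d with
  | zero =>
    intro a b hb _ _ hgt
    have hba : a = b := by omega
    subst hba
    apply chainMax_free
    intro p hp
    obtain ⟨i, hi, hpi⟩ := List.mem_iff_getElem.mp hp
    have hlen : i < s.length - a := by simpa using hi
    have hpe : p = s[a + i]'(by omega) := by rw [← hpi, List.getElem_drop]
    rw [hpe]
    exact hgt (a + i) (by omega) (by omega)
  | succ d ihd =>
    intro a b hb hble hle hgt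
    have ha : a < s.length := by omega
    rw [List.drop_eq_getElem_cons ha]
    rw [chainMax_skip c _ _ (by have := hle a ha (le_refl a) (by omega); omega)]
    exact ihd (a + 1) b (by omega) hble (fun j hj h1 h2 => hle j hj (by omega) h2) hgt

-- the suffix-maximum list B maintains: sufL t = [longest chain of t.drop j | j = 0..t.length]
def sufL : List (List Int) → List Int
  | [] => [0]
  | p :: r => chainMax none (p :: r) :: sufL r

theorem sufL_getD : ∀ (t : List (List Int)) (j : Nat), (sufL t).getD j 0 = chainMax none (t.drop j) := by
  intro t
  induction t with
  | nil =>
    intro j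
    cases j <;> simp [sufL, chainMax]
  | cons p r ih =>
    intro j
    cases j with
    | zero => simp [sufL]
    | succ j => simpa [sufL] using ih j

-- indexing the invariant state: below k it is 0-padding, from k on it is sufL of the suffix
theorem state_getD (s : List (List Int)) (k : Nat) (j : Nat) (hj : k ≤ j) :
    (List.replicate k (0:Int) ++ sufL (s.drop k)).getD j 0 = chainMax none (s.drop j) := by
  rw [List.getD_append_right (List.replicate k (0:Int)) (sufL (s.drop k)) 0 j (by simpa using hj)]
  rw [List.length_replicate, sufL_getD]
  have hdd : (s.drop k).drop (j - k) = s.drop j := by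
    rw [List.drop_drop]; congr 1; omega
  rw [hdd]

-- the outer loop of B, against the invariant
theorem loopB (s : List (List Int)) (hmono : (s.map (fun p => pvFst p)).Pairwise (· ≤ ·)) :
    ∀ (k : Nat), k ≤ s.length →
    ((PySem.List.pyRange ((k : Int) - 1) (-1) (-1)).foldl
      (fun (suf : List Int) i =>
        let lo := bsearchB (s.map (fun p => pvFst p)) (pvSnd (PySem.List.pyGetD s i [])) (((s.length : Int)) - (i + 1)).toNat (i + 1) ((s.length : Int))
        let v : Int := max (1 + PySem.List.pyGetD suf lo 0) (PySem.List.pyGetD suf (i + 1) 0)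
        PySem.List.pySetD suf i v)
      (List.replicate k 0 ++ sufL (s.drop k)))
    = sufL s := by
  intro k
  induction k with
  | zero =>
    intro _
    rw [PySem.List.pyRange_neg_one_eq_nil (by norm_num)]
    simp
  | succ k ih =>
    intro hk
    have hklt : k < s.length := by omega
    have hcast : ((k + 1 : Nat) : Int) - 1 = (k : Int) := by push_cast; ring
    rw [hcast, PySem.List.pyRange_neg_one_cons (by omega : (-1:Int) < (k:Int))]
    rw [List.foldl_cons]
    simp only []
    have hsk : PySem.List.pyGetD s ((k : Int)) [] = s[k] := by
      rw [PySem.List.pyGetD_natCast]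
      simp [List.getD, List.getElem?_eq_getElem hklt]
    set starts := s.map (fun p => pvFst p) with hstarts
    have hslen : starts.length = s.length := by simp [hstarts]
    set c := pvSnd (PySem.List.pyGetD s ((k : Int)) []) with hc
    obtain ⟨r1, r2, r3, r4⟩ := bsearchB_spec starts c hmono
      (((s.length : Int) - ((k : Int) + 1)).toNat) ((k : Int) + 1) ((s.length : Int)) (le_refl _)
      (by omega) (by omega) (by omega)
    set r := bsearchB starts c (((s.length : Int)) - ((k : Int) + 1)).toNat ((k : Int) + 1) ((s.length : Int)) with hr
    have hr0 : 0 ≤ r := by omega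
    have hrL : r.toNat ≤ s.length := by omega
    have hrk : k + 1 ≤ r.toNat := by omega
    -- the bounded chainMax over the suffix equals the free one past the boundary r
    have hkey : chainMax (some c) (s.drop (k + 1)) = chainMax none (s.drop r.toNat) := by
      apply chainMax_some_eq_drop s c (r.toNat - (k + 1)) (k + 1) r.toNat (by omega) hrL
      · intro j hj h1 h2
        have := r3 j (by omega) (by omega) (by omega)
        rwa [List.getElem_map] at this
      · intro j hj h1
        have := r4 j (by omega) (by omega) (by omega)
        rwa [List.getElem_map] at this
    -- read the two suffix maxima from the invariant state
    have hget_r : PySem.List.pyGetD (List.replicate (k+1) (0:Int) ++ sufL (s.drop (k+1))) r 0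
        = chainMax none (s.drop r.toNat) := by
      rw [show r = ((r.toNat : Nat) : Int) by omega, PySem.List.pyGetD_natCast]
      exact state_getD s (k+1) r.toNat hrk
    have hget_k1 : PySem.List.pyGetD (List.replicate (k+1) (0:Int) ++ sufL (s.drop (k+1))) ((k : Int) + 1) 0
        = chainMax none (s.drop (k+1)) := by
      rw [show ((k : Int) + 1) = (((k+1 : Nat) : Nat) : Int) by push_cast; ring, PySem.List.pyGetD_natCast]
      exact state_getD s (k+1) (k+1) (le_refl _)
    have hv : max (1 + chainMax none (s.drop r.toNat)) (chainMax none (s.drop (k+1)))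
        = chainMax none (s.drop k) := by
      rw [← hkey, List.drop_eq_getElem_cons hklt]
      simp only [chainMax, pvOk, if_true]
      rw [hsk] at hc
      rw [← hc]
    have hset : PySem.List.pySetD (List.replicate (k+1) (0:Int) ++ sufL (s.drop (k+1))) ((k : Int))
          (chainMax none (s.drop k))
        = List.replicate k 0 ++ sufL (s.drop k) := by
      rw [PySem.List.pySetD_natCast]
      have hd : sufL (s.drop k) = chainMax none (s.drop k) :: sufL (s.drop (k+1)) := by
        rw [List.drop_eq_getElem_cons hklt]
        simp only [sufL]
      have e : (List.replicate (k+1) (0:Int) ++ sufL (s.drop (k+1))).set k (chainMax none (s.drop k))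
          = (List.replicate (k+1) (0:Int)).set k (chainMax none (s.drop k)) ++ sufL (s.drop (k+1)) := by
        rw [List.set_append, if_pos (by simp)]
      have e2 : (List.replicate (k+1) (0:Int)).set k (chainMax none (s.drop k))
          = List.replicate k 0 ++ [chainMax none (s.drop k)] := by
        rw [List.replicate_succ', List.set_append, if_neg (by simp)]
        simp
      rw [e, e2, hd]
      simp [List.append_assoc]
    rw [hget_r, hget_k1, hv, hset]
    exact ih (by omega)

theorem alt_eq (pairs : List (List Int)) :
    findLongestChainDP_alt pairs
      = chainMax none (PySem.List.sorted pairs (fun p => pvFst p) false) := by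
  unfold findLongestChainDP_alt
  simp only []
  set s := PySem.List.sorted pairs (fun p => pvFst p) false with hs
  have hmono : (s.map (fun p => pvFst p)).Pairwise (· ≤ ·) :=
    PySem.List.sorted_map_key_pairwise pairs (fun p => pvFst p)
  have hinit : List.replicate (s.length + 1) (0:Int)
      = List.replicate s.length 0 ++ sufL (s.drop s.length) := by
    rw [List.drop_length]
    simp [sufL, List.replicate_succ']
  have hstart : ((s.length : Int)) - 1 = ((s.length : Nat) : Int) - 1 := rfl
  rw [hinit, hstart]
  rw [loopB s hmono s.length (le_refl _)]
  rw [PySem.List.pyGetD_zero, sufL_getD]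
  simp

-- ===== VERDICT (by name: the statement is the Claim_ definition above) =====
theorem findLongestChainDP_spec : Claim_unchanged_findLongestChainDP := by
  intro pairs _ hpre
  unfold Spec_findLongestChainDP
  intro hnD
  unfold D_findLongestChainDP at hnD
  rcases Nat.lt_or_ge pairs.length 2 with hlt | hge
  · have h0 : pairs.length = 0 := by omega
    have : pairs = [] := List.length_eq_zero_iff.mp h0
    subst this
    decide
  · rw [A_eq pairs hge, alt_eq pairs]
theorem findLongestChainDP_changed : Claim_changed_findLongestChainDP := by
  unfold Claim_changed_findLongestChainDP; decide
theorem findLongestChainDP_tight : Claim_exact_findLongestChainDP := by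
  intro pairs _ _ hD
  unfold D_findLongestChainDP at hD
  obtain ⟨p, rfl⟩ := List.length_eq_one_iff.mp hD
  have hA : findLongestChainDP [p] = 0 := by
    unfold findLongestChainDP
    rw [PySem.List.sorted_eq_self_of_pairwise [p] (fun q => pvFst q) (List.pairwise_singleton _ _)]
    simp only []
    rw [show ((List.length [p] : Int)) - 2 = -1 by simp]
    rw [PySem.List.pyRange_neg_one_eq_nil (by norm_num)]
    rfl
  have hB : findLongestChainDP_alt [p] = 1 := by
    rw [alt_eq]
    rw [PySem.List.sorted_eq_self_of_pairwise [p] (fun q => pvFst q) (List.pairwise_singleton _ _)]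
    simp [chainMax, pvOk]
  rw [hA, hB]
  decide
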